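-- pv_equiv track=rewrite | github.com/nhbala/nlp_a1 | main.py | create_nb_input
-- ===== SOURCE A (Python) =====
-- def create_nb_input(lst, dic, truthful):
--     xs = []
--     for sublist in lst:
--         new_dict = dic.fromkeys(dic, 0)
--         for elt in sublist:
--             if elt in dic:
--                 new_dict[elt] = new_dict[elt]+1
--         l = list(new_dict.values())
--         xs.append(l)
-- #    ys = []
-- #    for i in lst:
-- #        ys.append([truthful])
--     return xs, [truthful]*(len(lst))
-- ===== SOURCE B (Python) =====
-- def create_nb_input(lst, dic, truthful):
--     xs = [[sublist.count(word) for word in dic] for sublist in lst]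
--     return xs, [truthful] * len(lst)
-- ===== Notes on version B (the rewrite author's own statement) =====
-- stated objective: idiomatic
-- what changed: Each count vector is built by a comprehension that scans the sublist once per vocabulary word with list.count, instead of A's zeroed dict that is incremented element by element and then read out; the label list is [truthful]*len(lst) as before.
import Mathlib
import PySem

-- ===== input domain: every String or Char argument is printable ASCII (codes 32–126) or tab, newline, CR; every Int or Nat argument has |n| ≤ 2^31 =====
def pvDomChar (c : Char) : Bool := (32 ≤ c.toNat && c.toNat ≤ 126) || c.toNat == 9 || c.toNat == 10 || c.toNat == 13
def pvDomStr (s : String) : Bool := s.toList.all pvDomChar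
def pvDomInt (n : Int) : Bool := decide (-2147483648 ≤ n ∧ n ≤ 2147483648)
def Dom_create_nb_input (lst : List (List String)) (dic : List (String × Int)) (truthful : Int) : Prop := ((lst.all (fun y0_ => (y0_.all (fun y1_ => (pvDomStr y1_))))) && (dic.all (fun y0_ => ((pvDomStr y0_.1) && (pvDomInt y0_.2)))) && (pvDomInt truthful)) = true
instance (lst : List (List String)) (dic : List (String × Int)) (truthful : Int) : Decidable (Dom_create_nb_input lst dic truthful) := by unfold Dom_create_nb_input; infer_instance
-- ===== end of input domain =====

-- B replaces A's zeroed-dict counting loop by a per-vocabulary-word list.count comprehension (idiomatic; not faster).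
-- ===== PORT A =====
-- A's 'dic' is a Python dict; its key order (first insertion) over the assoc list is PySem.List.dedup of the keys.
def nbStep (keys : List String) (d : PySem.Dict String Int) (elt : String) : PySem.Dict String Int :=
  if keys.contains elt then d.insert elt (d.getD elt 0 + 1) else d

def create_nb_input (lst : List (List String)) (dic : List (String × Int)) (truthful : Int) : List (List Int) × List Int :=
  let keys := PySem.List.dedup (dic.map Prod.fst)
  let xs := lst.foldl (fun xs sublist =>
      let new_dict := keys.foldl (fun d k => d.insert k (0 : Int)) PySem.Dict.empty
      let new_dict := sublist.foldl (nbStep keys) new_dict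
      xs ++ [new_dict.values]) []
  (xs, PySem.List.pyRepeat [truthful] (lst.length : Int))

-- ===== PORT B =====
def create_nb_input_alt (lst : List (List String)) (dic : List (String × Int)) (truthful : Int) : List (List Int) × List Int :=
  let keys := PySem.List.dedup (dic.map Prod.fst)
  (lst.map (fun sublist => keys.map (fun word => (PySem.List.count sublist word : Int))),
   PySem.List.pyRepeat [truthful] (lst.length : Int))

-- ===== PRECONDITION & SPEC =====
def Spec_create_nb_input (lst : List (List String)) (dic : List (String × Int)) (truthful : Int) (out : List (List Int) × List Int) : Prop := out = create_nb_input_alt lst dic truthful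
instance (lst : List (List String)) (dic : List (String × Int)) (truthful : Int) (out : List (List Int) × List Int) : Decidable (Spec_create_nb_input lst dic truthful out) := by unfold Spec_create_nb_input; infer_instance

-- ===== CLAIM (what is proved, stated in full; the proofs are below) =====
def Claim_equal_create_nb_input : Prop := ∀ (lst : List (List String)) (dic : List (String × Int)) (truthful : Int), Dom_create_nb_input lst dic truthful → Spec_create_nb_input lst dic truthful (create_nb_input lst dic truthful)

-- ===== LEMMAS AND PROOFS =====


-- zeroed dict from the vocabulary: items are (k, 0) for each key
theorem nb_zero_items (keys : List String) (hnd : keys.Nodup) :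
    (keys.foldl (fun d k => d.insert k (0 : Int)) PySem.Dict.empty).items
      = keys.map (fun k => (k, (0 : Int))) := by
  have := PySem.Dict.items_foldl_insert_fresh (l := keys) (k := fun x => x)
      (v := fun _ => (0 : Int)) (d := PySem.Dict.empty)
      (by intro a _; simp [PySem.Dict.contains_empty]) (by simpa using hnd)
  simpa using this

theorem nb_loop_keys (keys : List String) (sub : List String) (d : PySem.Dict String Int)
    (h : d.keys = keys) : (sub.foldl (nbStep keys) d).keys = keys := by
  induction sub generalizing d with
  | nil => simpa using h
  | cons e t ih =>
    simp only [List.foldl_cons, nbStep]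
    split_ifs with hc
    · exact ih _ (by rw [PySem.Dict.keys_insert_of_contains, h]
                     rw [PySem.Dict.contains_iff_mem_keys, h]
                     simpa using hc)
    · exact ih _ h

theorem nb_loop_getD (keys : List String) (sub : List String) (d : PySem.Dict String Int)
    (k : String) (hk : k ∈ keys) :
    (sub.foldl (nbStep keys) d).getD k 0 = d.getD k 0 + sub.count k := by
  induction sub generalizing d with
  | nil => simp
  | cons e t ih =>
    simp only [List.foldl_cons, nbStep]
    split_ifs with hc
    · rw [ih, PySem.Dict.getD_insert]
      by_cases he : k = e
      · subst he
        simp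
        omega
      · have hne : e ≠ k := fun h => he h.symm
        simp [he, hne]
    · rw [ih]
      have hne : e ≠ k := by
        intro h; subst h; exact hc (by simpa using hk)
      simp [hne]

theorem nb_values (keys : List String) (hnd : keys.Nodup) (sub : List String) :
    (sub.foldl (nbStep keys)
      (keys.foldl (fun d k => d.insert k (0 : Int)) PySem.Dict.empty)).values
      = keys.map (fun word => (sub.count word : Int)) := by
  set d0 := keys.foldl (fun d k => d.insert k (0 : Int)) PySem.Dict.empty with hd0
  have hitems : d0.items = keys.map (fun k => (k, (0 : Int))) := nb_zero_items keys hnd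
  have hkeys0 : d0.keys = keys := by
    simp [PySem.Dict.keys, hitems, Function.comp_def]
  set d := sub.foldl (nbStep keys) d0 with hd
  have hkeys : d.keys = keys := nb_loop_keys keys sub d0 hkeys0
  have hnodup : d.keys.Nodup := hkeys ▸ hnd
  have hgd0 : ∀ k ∈ keys, d0.getD k 0 = 0 := by
    intro k hk
    have : (k, (0 : Int)) ∈ d0.items := by
      rw [hitems]; exact List.mem_map.2 ⟨k, hk, rfl⟩
    exact PySem.Dict.getD_of_mem_items d0 this (hkeys0 ▸ hnd) 0
  have hval := PySem.Dict.values_eq_map_keys d hnodup (0 : Int)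
  rw [hval, hkeys]
  refine List.map_congr_left ?_
  intro k hk
  rw [nb_loop_getD keys sub d0 k hk, hgd0 k hk]
  simp

-- ===== VERDICT (by name: the statement is the Claim_ definition above) =====
theorem create_nb_input_spec : Claim_equal_create_nb_input := by
  intro lst dic truthful _
  unfold Spec_create_nb_input create_nb_input create_nb_input_alt
  have hnd : (PySem.List.dedup (dic.map Prod.fst)).Nodup := PySem.List.nodup_dedup _
  refine Prod.ext ?_ rfl
  simp only [PySem.List.foldl_append_singleton_eq_map, List.nil_append]
  refine List.map_congr_left ?_
  intro sub _
  simpa [PySem.List.count_eq] using nb_values _ hnd sub
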